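-- pv_equiv track=rewrite | github.com/cjrosen/at-the-catastrophy-point | cubes.py | pattern_for_segment
-- ===== SOURCE A (Python) =====
-- import math
--
-- def bit_sum(i):
--     i = i - ((i >> 1) & 0x55555555)
--     i = (i & 0x33333333) + ((i >> 2) & 0x33333333)
--     i = ((i + (i >> 4) & 0xF0F0F0F) * 0x1010101) >> 24
--     return i
--
-- def pattern_for_segment(s):
--     c = 0
--     for bits in range(1, 6):
--         for i in range(64):
--             if bit_sum(i) == bits:
--                 c += 1
--                 if c == s:
--                     return i
--     for bits in range(1, 6):
--         for i in range(64):
--             if bit_sum(i) == bits: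
--                 c += 1
--                 if c == s:
--                     return (i << 6) | int(math.pow(2, 6) - 1)
-- ===== SOURCE B (Python) =====
-- def pattern_for_segment(s):
--     # Build the popcount-ordered table once (stable sort keeps ascending i within
--     # each popcount class), then index into it directly.
--     patterns = sorted((i for i in range(64) if 1 <= bin(i).count("1") <= 5),
--                       key=lambda i: bin(i).count("1"))
--     n = len(patterns)
--     if 1 <= s <= n:
--         return patterns[s - 1]
--     if n < s <= 2 * n:
--         return (patterns[s - n - 1] << 6) | 63
--     return None
-- ===== Notes on version B (the rewrite author's own statement) =====
-- stated objective: simpler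
-- what changed: B replaces A's two nested counting scans (re-enumerating all 64 patterns for each popcount 1..5 while incrementing a counter until it hits s) with a single stably-sorted lookup table indexed directly by s via band arithmetic.
import Mathlib
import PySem

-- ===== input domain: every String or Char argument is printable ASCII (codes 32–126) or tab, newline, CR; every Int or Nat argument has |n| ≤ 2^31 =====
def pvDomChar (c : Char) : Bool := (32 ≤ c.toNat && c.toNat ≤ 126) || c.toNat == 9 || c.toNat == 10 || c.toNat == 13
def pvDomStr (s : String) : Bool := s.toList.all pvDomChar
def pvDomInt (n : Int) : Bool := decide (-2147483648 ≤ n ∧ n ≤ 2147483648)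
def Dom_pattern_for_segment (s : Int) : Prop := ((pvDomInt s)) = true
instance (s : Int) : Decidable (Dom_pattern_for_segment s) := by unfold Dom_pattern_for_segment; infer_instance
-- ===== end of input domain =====

-- B builds the popcount-ordered table once (a stable sort) and indexes it directly,
-- instead of A's two nested counting scans; objective: simpler.


-- ===== PORT A =====
-- literal transliteration of bit_sum (i, >>, & on nonnegative ints; exact there)
def bit_sum (i : Int) : Int :=
  let i1 := i - (Int.land (Int.shiftRight i 1) 0x55555555)
  let i2 := (Int.land i1 0x33333333) + (Int.land (Int.shiftRight i1 2) 0x33333333)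
  Int.shiftRight ((Int.land (i2 + Int.shiftRight i2 4) 0xF0F0F0F) * 0x1010101) 24

-- one iteration of A's inner 'for i in range(64)' body; the state is (c, returned value);
-- a some in the second component models Python's early return (later iterations keep it).
def innerStep (s bits : Int) (ret : Int → Int) (st : Int × Option Int) (i : Int) : Int × Option Int :=
  match st with
  | (c, some r) => (c, some r)
  | (c, none) =>
    if bit_sum i = bits then
      if c + 1 = s then (c + 1, some (ret i)) else (c + 1, none)
    else (c, none)

def innerLoop (s bits : Int) (ret : Int → Int) (st : Int × Option Int) : Int × Option Int :=
  (PySem.List.pyRange 0 64 1).foldl (innerStep s bits ret) st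

def outerLoop (s : Int) (ret : Int → Int) (st : Int × Option Int) : Int × Option Int :=
  (PySem.List.pyRange 1 6 1).foldl (fun st bits => innerLoop s bits ret st) st

def pattern_for_segment (s : Int) : Option Int :=
  let st1 := outerLoop s (fun i => i) (0, none)
  match st1 with
  | (_, some r) => some r
  | (c, none) => (outerLoop s (fun i => Int.lor (Int.shiftLeft i 6) 63) (c, none)).2

-- ===== PORT B =====
-- bin(i).count("1") for i ≥ 0 (all i fed to it are 0..63): the number of 1-bits
def bcount (i : Int) : Int := ((Nat.digits 2 i.toNat).sum : Int)

-- sorted((i for i in range(64) if 1 <= bcount(i) <= 5), key=popcount); stable sort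
def patternsB : List Int :=
  PySem.List.sorted ((PySem.List.pyRange 0 64 1).filter (fun i => decide (1 ≤ bcount i ∧ bcount i ≤ 5))) bcount

def pattern_for_segment_alt (s : Int) : Option Int :=
  let n : Int := patternsB.length
  if 1 ≤ s ∧ s ≤ n then PySem.List.pyGet? patternsB (s - 1)  -- index is in range here, so pyGet? = some patterns[s-1], exact
  else if n < s ∧ s ≤ 2 * n then (PySem.List.pyGet? patternsB (s - n - 1)).map (fun i => Int.lor (Int.shiftLeft i 6) 63)
  else none

-- ===== PRECONDITION & SPEC =====
def Spec_pattern_for_segment (s : Int) (out : Option Int) : Prop := out = pattern_for_segment_alt s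
instance (s : Int) (out : Option Int) : Decidable (Spec_pattern_for_segment s out) := by unfold Spec_pattern_for_segment; infer_instance

-- ===== CLAIM (what is proved, stated in full; the proofs are below) =====
def Claim_equal_pattern_for_segment : Prop := ∀ (s : Int), Dom_pattern_for_segment s → Spec_pattern_for_segment s (pattern_for_segment s)

-- ===== LEMMAS AND PROOFS =====

-- Invariant of A's inner scan when s is never hit: the counter advances by the number
-- of matches and no value is returned.
lemma foldl_innerStep_none (s bits : Int) (ret : Int → Int) :
    ∀ (l : List Int) (c : Int),
      (s ≤ c ∨ c + ((l.filter (fun i => decide (bit_sum i = bits))).length : Int) < s) →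
      l.foldl (innerStep s bits ret) (c, none) =
        (c + ((l.filter (fun i => decide (bit_sum i = bits))).length : Int), none) := by
  intro l
  induction l with
  | nil => intro c _; simp
  | cons i t ih =>
    intro c h
    by_cases hb : bit_sum i = bits
    · have hlen : ((((i :: t).filter (fun j => decide (bit_sum j = bits))).length : Int))
          = ((t.filter (fun j => decide (bit_sum j = bits))).length : Int) + 1 := by
        simp [hb]
      have hne : c + 1 ≠ s := by
        rw [hlen] at h
        have hlnn : (0:Int) ≤ ((t.filter (fun j => decide (bit_sum j = bits))).length : Int) :=
          Int.natCast_nonneg _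
        omega
      have hstep : innerStep s bits ret (c, none) i = (c + 1, none) := by
        simp [innerStep, hb, hne]
      rw [List.foldl_cons, hstep, ih (c + 1) (by rw [hlen] at h; omega), hlen]
      ring_nf
    · have hstep : innerStep s bits ret (c, none) i = (c, none) := by
        simp [innerStep, hb]
      rw [List.foldl_cons, hstep, ih c (by simpa [hb] using h)]
      simp [hb]

lemma innerLoop_none (s bits : Int) (ret : Int → Int) (c k d : Int)
    (hk : ((((PySem.List.pyRange 0 64 1).filter (fun i => decide (bit_sum i = bits))).length : Int)) = k)
    (hd : c + k = d) (h : s ≤ c ∨ d < s) :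
    innerLoop s bits ret (c, none) = (d, none) := by
  unfold innerLoop
  rw [foldl_innerStep_none s bits ret _ c (by rw [hk]; omega), hk, hd]

lemma outer_none (s : Int) (ret : Int → Int) (c d : Int) (hd : c + 62 = d)
    (h : s ≤ c ∨ d < s) : outerLoop s ret (c, none) = (d, none) := by
  unfold outerLoop
  rw [show PySem.List.pyRange 1 6 1 = [1,2,3,4,5] from by decide]
  simp only [List.foldl_cons, List.foldl_nil]
  rw [innerLoop_none s 1 ret c 6 (c+6) (by decide) rfl (by omega),
      innerLoop_none s 2 ret (c+6) 15 (c+21) (by decide) (by ring) (by omega),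
      innerLoop_none s 3 ret (c+21) 20 (c+41) (by decide) (by ring) (by omega),
      innerLoop_none s 4 ret (c+41) 15 (c+56) (by decide) (by ring) (by omega),
      innerLoop_none s 5 ret (c+56) 6 d (by decide) (by omega) (by omega)]

lemma A_none (s : Int) (h : s ≤ 0 ∨ 124 < s) : pattern_for_segment s = none := by
  unfold pattern_for_segment
  rw [outer_none s _ 0 62 (by ring) (by omega)]
  simp only
  rw [outer_none s _ 62 124 (by ring) (by omega)]

set_option maxRecDepth 40000 in
lemma B_none (s : Int) (h : s ≤ 0 ∨ 124 < s) : pattern_for_segment_alt s = none := by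
  simp only [pattern_for_segment_alt, show ((patternsB.length : Int)) = 62 from by decide]
  split_ifs with h1 h2
  · omega
  · omega
  · rfl

set_option maxRecDepth 100000 in
set_option maxHeartbeats 2000000 in
lemma AB_inRange : ∀ n ∈ List.range 125,
    pattern_for_segment (n : Int) = pattern_for_segment_alt (n : Int) := by decide

-- ===== VERDICT (by name: the statement is the Claim_ definition above) =====
theorem pattern_for_segment_spec : Claim_equal_pattern_for_segment := by
  intro s _hdom
  unfold Spec_pattern_for_segment
  by_cases h1 : 1 ≤ s ∧ s ≤ 124
  · have hs : ((s.toNat : Nat) : Int) = s := by omega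
    rw [← hs]
    exact AB_inRange s.toNat (by rw [List.mem_range]; omega)
  · rw [A_none s (by omega), B_none s (by omega)]
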